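-- pv_equiv track=rewrite | github.com/hugolag64/Notionator | ui/ai_dialog.py | _choose_representative
-- ===== SOURCE A (Python) =====
-- from typing import List, Dict, Optional, Tuple
--
-- def _choose_representative(items: List[Dict], preferred_pages: set[int]) -> Dict:
--     if not items:
--         return {}
--     if preferred_pages:
--         for it in items:
--             try:
--                 if int(it.get("page", -1)) in preferred_pages:
--                     return it
--             except Exception:
--                 pass
--     pages = [int(it.get("page", 0)) for it in items if str(it.get("page", "")).isdigit()]
--     if pages:
--         pages.sort()
--         median = pages[len(pages)//2]
--         items_sorted = sorted(items, key=lambda i: abs(int(i.get("page", median) or median) - median))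
--         return items_sorted[0]
--     return items[0]
-- ===== SOURCE B (Python) =====
-- from typing import List, Dict
--
--
-- def _page_int(it: Dict):
--     try:
--         return int(it.get("page", -1))
--     except Exception:
--         return None
--
--
-- def _choose_representative(items: List[Dict], preferred_pages: set[int]) -> Dict:
--     if not items:
--         return {}
--     if preferred_pages:
--         hit = next((it for it in items if _page_int(it) in preferred_pages), None)
--         if hit is not None:
--             return hit
--     pages = [int(it.get("page", 0)) for it in items if str(it.get("page", "")).isdigit()]
--     if not pages:
--         return items[0]
--     # sorting-free median: rank selection by counting instead of pages.sort()
--     k = len(pages) // 2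
--     median = next(x for x in pages
--                   if sum(p < x for p in pages) <= k < sum(p <= x for p in pages))
--     # argmin by value-then-index instead of sorting a copy of items
--     dists = [abs(int(it.get("page", median) or median) - median) for it in items]
--     return items[dists.index(min(dists))]
-- ===== Notes on version B (the rewrite author's own statement) =====
-- stated objective: alternative
-- what changed: B is sorting-free: A sorts the page list to take the median and then builds a fully sorted copy of items to take [0]; B finds the median by rank selection (the first page value whose below/at-or-below counts bracket len//2) and picks the representative as items[dists.index(min(dists))] over the precomputed distance list, no sort anywhere.
import Mathlib
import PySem

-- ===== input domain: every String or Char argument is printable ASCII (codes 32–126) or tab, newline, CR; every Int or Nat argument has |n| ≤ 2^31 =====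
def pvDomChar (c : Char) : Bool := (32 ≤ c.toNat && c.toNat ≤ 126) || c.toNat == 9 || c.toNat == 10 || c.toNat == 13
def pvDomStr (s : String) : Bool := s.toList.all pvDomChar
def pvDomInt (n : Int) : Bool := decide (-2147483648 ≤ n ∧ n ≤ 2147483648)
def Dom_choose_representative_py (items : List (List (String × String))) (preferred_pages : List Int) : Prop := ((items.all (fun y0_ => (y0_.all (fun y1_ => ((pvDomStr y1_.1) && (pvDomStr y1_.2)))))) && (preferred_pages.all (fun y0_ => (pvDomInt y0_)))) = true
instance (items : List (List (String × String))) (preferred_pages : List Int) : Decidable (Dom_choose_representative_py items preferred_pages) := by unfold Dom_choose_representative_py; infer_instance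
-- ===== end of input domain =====

-- B is sorting-free (median by rank-count selection, representative by argmin over a distance
-- list) where A sorts twice; objective: alternative algorithm, no speed claim.
-- Both programs raise the same ValueError on the same inputs; Pre_ excludes exactly those.

-- ===== PORT A =====
-- it.get("page")  (first match in the association list, like the Python dict lookup)
def pvPageGet (it : List (String × String)) : Option String :=
  (PySem.Dict.mk it).get? "page"

-- int(it.get("page", -1)) : none = int() raised (the try/except swallows it)
def pvPrefInt (it : List (String × String)) : Option Int :=
  match pvPageGet it with
  | some s => PySem.Int.ofStr? s
  | none => some (-1)

def pvPrefHit (preferred_pages : List Int) (it : List (String × String)) : Bool :=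
  match pvPrefInt it with
  | some n => preferred_pages.contains n
  | none => false

-- str(it.get("page", "")).isdigit()
def pvIsDigitPage (it : List (String × String)) : Bool :=
  PySem.Str.strIsdigit ((pvPageGet it).getD "")

-- int(it.get("page", 0)) under the isdigit filter (there ofStr? is always some; getD 0 never fires)
def pvPageInt (it : List (String × String)) : Int :=
  match pvPageGet it with
  | some s => (PySem.Int.ofStr? s).getD 0
  | none => 0

-- int(i.get("page", median) or median); ofStr? = none is where the Python raises — excluded by Pre_,
-- the getD 0 default is never reached inside Pre_
def pvKeyVal (median : Int) (it : List (String × String)) : Int :=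
  match pvPageGet it with
  | some s => if s = "" then median else (PySem.Int.ofStr? s).getD 0
  | none => median

-- abs(int(i.get("page", median) or median) - median)
def pvKey (median : Int) (it : List (String × String)) : Int :=
  |pvKeyVal median it - median|

def choose_representative_py (items : List (List (String × String))) (preferred_pages : List Int) : List (String × String) :=
  if items = [] then []
  else
    -- if preferred_pages: for it in items: ... return it
    let scan : Option (List (String × String)) :=
      if preferred_pages ≠ [] then items.find? (pvPrefHit preferred_pages) else none
    match scan with
    | some it => it
    | none =>
      let pages : List Int := (items.filter pvIsDigitPage).map pvPageInt
      if pages ≠ [] then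
        let sp := PySem.List.sorted pages (fun x => x) false
        let median := PySem.List.pyGetD sp (PySem.Int.floordiv (sp.length : Int) 2) 0
        -- sorted(items, key=...)[0]; the list is nonempty, pyGetD's default is never reached
        PySem.List.pyGetD (PySem.List.sorted items (pvKey median) false) 0 []
      else PySem.List.pyGetD items 0 []

-- ===== PORT B =====
-- the rank condition of B's median generator: sum(p < x) <= k < sum(p <= x)
def pvRankCond (pages : List Int) (k : Int) (x : Int) : Bool :=
  decide (((pages.countP (fun p => decide (p < x))) : Int) ≤ k ∧
          k < ((pages.countP (fun p => decide (p ≤ x))) : Int))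

def choose_representative_py_alt (items : List (List (String × String))) (preferred_pages : List Int) : List (String × String) :=
  if items = [] then []
  else
    -- hit = next((it for it in items if _page_int(it) in preferred_pages), None)
    let hit : Option (List (String × String)) :=
      if preferred_pages ≠ [] then items.find? (pvPrefHit preferred_pages) else none
    match hit with
    | some it => it
    | none =>
      let pages : List Int := (items.filter pvIsDigitPage).map pvPageInt
      if pages = [] then PySem.List.pyGetD items 0 []
      else
        -- median = next(x for x in pages if sum(p < x ...) <= k < sum(p <= x ...))
        let k := PySem.Int.floordiv (pages.length : Int) 2
        let median := (pages.find? (pvRankCond pages k)).getD 0   -- the generator always yields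
        -- dists = [...]; items[dists.index(min(dists))]
        let dists := items.map (pvKey median)
        let m := (PySem.List.min? dists (fun x => x)).getD 0      -- min(dists); dists nonempty
        match PySem.List.index? dists m with
        | some i => PySem.List.pyGetD items (i : Int) []
        | none => []                                              -- unreachable: min is present

-- ===== PRECONDITION & SPEC =====
-- ok for the distance key: page absent, empty, or int-parseable
def pvPageOk (it : List (String × String)) : Bool :=
  match pvPageGet it with
  | none => true
  | some s => s == "" || (PySem.Int.ofStr? s).isSome

-- Pre_ excludes exactly the inputs where the Python A raises ValueError in the sort key: some item has a
-- non-empty, non-int-parseable "page" while a digit page exists and neither the empty-items nor the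
-- preferred-page early return fires. (B raises the identical error in its dists comprehension there.)
def Pre_choose_representative_py (items : List (List (String × String))) (preferred_pages : List Int) : Prop :=
  (items.isEmpty
   || (!preferred_pages.isEmpty && items.any (pvPrefHit preferred_pages))
   || items.all (fun it => !pvIsDigitPage it)
   || items.all pvPageOk) = true
instance (items : List (List (String × String))) (preferred_pages : List Int) : Decidable (Pre_choose_representative_py items preferred_pages) := by unfold Pre_choose_representative_py; infer_instance

def pvWitness_choose_representative_py : (List (List (String × String))) × List Int :=
  ([[("page", "3")], [("page", "7")], [("title", "x")]], [7])

def Spec_choose_representative_py (items : List (List (String × String))) (preferred_pages : List Int) (out : List (String × String)) : Prop := out = choose_representative_py_alt items preferred_pages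
instance (items : List (List (String × String))) (preferred_pages : List Int) (out : List (String × String)) : Decidable (Spec_choose_representative_py items preferred_pages out) := by unfold Spec_choose_representative_py; infer_instance

-- ===== CLAIM (what is proved, stated in full; the proofs are below) =====
def Claim_equal_choose_representative_py : Prop := ∀ (items : List (List (String × String))) (preferred_pages : List Int), Dom_choose_representative_py items preferred_pages → Pre_choose_representative_py items preferred_pages → Spec_choose_representative_py items preferred_pages (choose_representative_py items preferred_pages)

-- ===== LEMMAS AND PROOFS =====

-- MEDIAN: the rank-count condition is satisfied by sorted[k] and determines its value uniquely.

theorem pvRank_unique (pages : List Int) (k : Int) (x y : Int)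
    (hx : pvRankCond pages k x = true) (hy : pvRankCond pages k y = true) : x = y := by
  simp only [pvRankCond, decide_eq_true_eq] at hx hy
  by_contra hne
  rcases lt_or_gt_of_ne hne with h | h
  · have hmono : pages.countP (fun p => decide (p ≤ x)) ≤ pages.countP (fun p => decide (p < y)) := by
      apply List.countP_mono_left
      intro a _ ha
      simp only [decide_eq_true_eq] at ha ⊢
      omega
    omega
  · have hmono : pages.countP (fun p => decide (p ≤ y)) ≤ pages.countP (fun p => decide (p < x)) := by
      apply List.countP_mono_left
      intro a _ ha
      simp only [decide_eq_true_eq] at ha ⊢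
      omega
    omega

-- counting through a take/drop split
theorem pvCountP_ge (s : List Int) (n : Nat) (q : Int → Bool) (hn : n ≤ s.length)
    (h : ∀ x ∈ s.take n, q x = true) : n ≤ s.countP q := by
  have h1 : (s.take n).countP q = (s.take n).length := List.countP_eq_length.mpr h
  have h2 : s.countP q = (s.take n).countP q + (s.drop n).countP q := by
    conv_lhs => rw [← List.take_append_drop n s]
    exact List.countP_append ..
  have h3 : (s.take n).length = n := by rw [List.length_take]; omega
  omega

theorem pvCountP_le (s : List Int) (n : Nat) (q : Int → Bool)
    (h : ∀ x ∈ s.drop n, q x = false) : s.countP q ≤ n := by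
  have h0 : (s.drop n).countP q = 0 := List.countP_eq_zero.mpr (by intro a ha; simp [h a ha])
  have h2 : s.countP q = (s.take n).countP q + (s.drop n).countP q := by
    conv_lhs => rw [← List.take_append_drop n s]
    exact List.countP_append ..
  have h3 := List.countP_le_length (l := s.take n) (p := q)
  have h4 : (s.take n).length ≤ n := by rw [List.length_take]; omega
  omega

-- sorted pages, k-th element satisfies the rank condition over the sorted list
theorem pvRank_sorted (s : List Int) (hs : s.Pairwise (· ≤ ·)) (kn : Nat) (hk : kn < s.length) :
    s.countP (fun p => decide (p < s[kn])) ≤ kn ∧ kn < s.countP (fun p => decide (p ≤ s[kn])) := by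
  have hget := List.pairwise_iff_getElem.mp hs
  constructor
  · apply pvCountP_le
    intro a ha
    rw [List.mem_iff_getElem] at ha
    obtain ⟨i, hi, rfl⟩ := ha
    have hlen : kn + i < s.length := by
      have := s.length_drop (i := kn); omega
    rw [List.getElem_drop]
    simp only [decide_eq_false_iff_not, not_lt]
    rcases Nat.eq_or_lt_of_le (Nat.le_add_right kn i) with h | h
    · simp [← h]
    · exact hget kn (kn + i) hk hlen h
  · have : kn + 1 ≤ s.countP (fun p => decide (p ≤ s[kn])) := by
      apply pvCountP_ge _ _ _ (by omega)
      intro a ha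
      rw [List.mem_iff_getElem] at ha
      obtain ⟨i, hi, rfl⟩ := ha
      have hi1 : i < kn + 1 := by
        have := List.length_take (i := kn + 1) (l := s); omega
      have hi' : i < s.length := by omega
      rw [List.getElem_take]
      simp only [decide_eq_true_eq]
      rcases Nat.lt_or_ge i kn with h | h
      · exact hget i kn hi' hk h
      · have : i = kn := by omega
        simp [this]
    omega

-- B's median generator finds exactly A's sorted-middle value
theorem pvMedian_eq (pages : List Int) (hne : pages ≠ []) :
    (pages.find? (pvRankCond pages (PySem.Int.floordiv (pages.length : Int) 2))).getD 0 =
      PySem.List.pyGetD (PySem.List.sorted pages (fun x => x) false)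
        (PySem.Int.floordiv (((PySem.List.sorted pages (fun x => x) false).length : Int)) 2) 0 := by
  set s := PySem.List.sorted pages (fun x => x) false with hsdef
  have hperm : s.Perm pages := PySem.List.sorted_perm ..
  have hlen : s.length = pages.length := hperm.length_eq
  have hpos : 0 < pages.length := List.length_pos_iff.mpr hne
  set kn : Nat := pages.length / 2 with hkn
  have hklt : kn < s.length := by rw [hlen]; omega
  -- the Int index is the Nat index
  have hk1 : PySem.Int.floordiv ((s.length : Int)) 2 = (kn : Int) := by
    rw [hlen]; exact_mod_cast PySem.Int.floordiv_natCast pages.length 2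
  have hk2 : PySem.Int.floordiv ((pages.length : Int)) 2 = (kn : Int) := by
    exact_mod_cast PySem.Int.floordiv_natCast pages.length 2
  have hA : PySem.List.pyGetD s (PySem.Int.floordiv ((s.length : Int)) 2) 0 = s[kn] := by
    rw [hk1, PySem.List.pyGetD_natCast]
    simp [List.getElem?_eq_getElem hklt]
  rw [hA, hk2]
  -- s[kn] satisfies the rank condition (counts transfer along the permutation)
  have hsorted : s.Pairwise (· ≤ ·) := PySem.List.sorted_pairwise ..
  have hrank := pvRank_sorted s hsorted kn hklt
  have hcnt1 : pages.countP (fun p => decide (p < s[kn])) = s.countP (fun p => decide (p < s[kn])) :=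
    (hperm.countP_eq _).symm
  have hcnt2 : pages.countP (fun p => decide (p ≤ s[kn])) = s.countP (fun p => decide (p ≤ s[kn])) :=
    (hperm.countP_eq _).symm
  have hcond : pvRankCond pages (kn : Int) s[kn] = true := by
    simp only [pvRankCond, decide_eq_true_eq, hcnt1, hcnt2]
    constructor
    · exact_mod_cast Int.ofNat_le.mpr hrank.1
    · exact_mod_cast Int.ofNat_lt.mpr hrank.2
  -- the generator yields something: s[kn] is itself a member of pages
  have hmem : s[kn] ∈ pages := hperm.mem_iff.mp (s.getElem_mem hklt)
  have hsome : (pages.find? (pvRankCond pages (kn : Int))).isSome := by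
    rw [List.find?_isSome]
    exact ⟨s[kn], hmem, hcond⟩
  obtain ⟨x, hx⟩ := Option.isSome_iff_exists.mp hsome
  rw [hx, Option.getD_some]
  exact pvRank_unique pages (kn : Int) x s[kn] (List.find?_some hx) hcond

-- ARGMIN: head of Python's stable sort = min?, and min? = first index attaining the min value.

-- head of a stable insertion = the min?-style update
theorem pvHead?_insertBy {α κ : Type} [LT κ] [DecidableLT κ] (key : α → κ) (x : α) (acc : List α) :
    (PySem.List.insertBy (fun a b => decide (key a < key b)) x acc).head? =
      (match acc.head? with
       | none => some x
       | some m => if key x < key m then some x else some m) := by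
  cases acc with
  | nil => simp [PySem.List.insertBy]
  | cons y ys =>
    simp only [PySem.List.insertBy, List.head?_cons]
    by_cases h : key x < key y <;> simp [h]

-- head of Python's stable sorted = Python's min with the same key (first minimal element)
theorem pvHead?_sorted_eq_min? {α κ : Type} [LT κ] [DecidableLT κ] (xs : List α) (key : α → κ) :
    (PySem.List.sorted xs key false).head? = PySem.List.min? xs key := by
  rw [PySem.List.sorted_eq_foldl_insertBy]
  suffices h : ∀ (l : List α) (acc : List α),
      (l.foldl (fun acc x => PySem.List.insertBy (fun a b => decide (key a < key b)) x acc) acc).head? =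
        l.foldl (fun (o : Option α) x =>
          match o with
          | none => some x
          | some m => if key x < key m then some x else some m) acc.head? by
    exact h xs []
  intro l
  induction l with
  | nil => intro acc; rfl
  | cons x tl ih =>
    intro acc
    simp only [List.foldl_cons, ih, pvHead?_insertBy]

theorem pvPyGetD_zero_head {α : Type} (xs : List α) (d : α) :
    PySem.List.pyGetD xs 0 d = xs.head?.getD d := by
  cases xs <;> simp [PySem.List.pyGetD, PySem.List.pyIdx?, PySem.List.pyGet?]

-- the min?-fold invariant: the result is the FIRST element attaining the minimal key
theorem pvMinFold_invariant {α : Type} (key : α → Int) :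
    ∀ (l : List α) (b r : α),
      l.foldl (fun (o : Option α) x =>
          match o with
          | none => some x
          | some m => if key x < key m then some x else some m) (some b) = some r →
      (r = b ∧ ∀ x ∈ l, ¬ key x < key b) ∨
      (key r < key b ∧ l.find? (fun x => key x == key r) = some r ∧ ∀ x ∈ l, ¬ key x < key r) := by
  intro l
  induction l with
  | nil => intro b r h; left; simp at h; simp [h]
  | cons x tl ih =>
    intro b r h
    simp only [List.foldl_cons] at h
    by_cases hx : key x < key b
    · rw [if_pos hx] at h
      rcases ih x r h with ⟨rfl, hall⟩ | ⟨hlt, hfind, hall⟩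
      · right
        refine ⟨hx, ?_, ?_⟩
        · rw [List.find?_cons_of_pos (by simp)]
        · intro y hy
          rcases List.mem_cons.mp hy with rfl | hy'
          · simp
          · exact hall y hy'
      · right
        refine ⟨lt_trans hlt hx, ?_, ?_⟩
        · rw [List.find?_cons_of_neg (by simp; omega)]
          exact hfind
        · intro y hy
          rcases List.mem_cons.mp hy with rfl | hy'
          · omega
          · exact hall y hy'
    · rw [if_neg hx] at h
      rcases ih b r h with ⟨rfl, hall⟩ | ⟨hlt, hfind, hall⟩
      · left
        refine ⟨rfl, ?_⟩
        intro y hy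
        rcases List.mem_cons.mp hy with rfl | hy'
        · exact hx
        · exact hall y hy'
      · right
        refine ⟨hlt, ?_, ?_⟩
        · rw [List.find?_cons_of_neg (by simp; omega)]
          exact hfind
        · intro y hy
          rcases List.mem_cons.mp hy with rfl | hy'
          · omega
          · exact hall y hy'

-- min? returns the first element whose key equals the minimal key
theorem pvMin?_find? {α : Type} (key : α → Int) (l : List α) (r : α)
    (h : PySem.List.min? l key = some r) :
    l.find? (fun x => key x == key r) = some r := by
  cases l with
  | nil => simp [PySem.List.min?] at h
  | cons b tl =>
    have h' : tl.foldl (fun (o : Option α) x =>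
        match o with
        | none => some x
        | some m => if key x < key m then some x else some m) (some b) = some r := h
    rcases pvMinFold_invariant key tl b r h' with ⟨rfl, _⟩ | ⟨hlt, hfind, _⟩
    · rw [List.find?_cons_of_pos (by simp)]
    · rw [List.find?_cons_of_neg (by simp; omega)]
      exact hfind

-- the minimal VALUE of the mapped keys is the key of min?'s element
theorem pvMinVal_eq_key {α : Type} (key : α → Int) (l : List α) (r : α)
    (h : PySem.List.min? l key = some r) :
    PySem.List.min? (l.map key) (fun x => x) = some (key r) := by
  have hne : l ≠ [] := by rintro rfl; simp [PySem.List.min?] at h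
  have hne' : l.map key ≠ [] := by simp [hne]
  obtain ⟨v, hv⟩ := Option.isSome_iff_exists.mp
    (by rw [Option.isSome_iff_ne_none]; simp [PySem.List.min?_eq_none_iff, hne'] :
      (PySem.List.min? (l.map key) (fun x => x)).isSome)
  rw [hv]
  congr 1
  have hvmem : v ∈ l.map key := PySem.List.min?_mem hv
  have hvmin : ∀ y ∈ l.map key, v ≤ y := by
    intro y hy; exact PySem.List.min?_isMin hv y hy
  have hrmem : key r ∈ l.map key := List.mem_map_of_mem (PySem.List.min?_mem h)
  have hrmin : ∀ y ∈ l, key r ≤ key y := PySem.List.min?_isMin h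
  obtain ⟨x0, hx0, rfl⟩ := List.mem_map.mp hvmem
  exact le_antisymm (hvmin (key r) hrmem) (hrmin x0 hx0)

-- B's index-of-min selection l[index?(map key l, v)] = the first element whose key is v
theorem pvIndexSel_eq_find? {α : Type} (key : α → Int) (l : List α) (v : Int) (d : α) :
    (match PySem.List.index? (l.map key) v with
     | some i => PySem.List.pyGetD l (i : Int) d
     | none => d) = (l.find? (fun x => key x == v)).getD d := by
  induction l with
  | nil => simp [PySem.List.index?]
  | cons x tl ih =>
    by_cases hx : key x = v
    · rw [List.map_cons, hx, PySem.List.index?_cons_self]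
      simp [hx, pvPyGetD_zero_head]
    · rw [List.map_cons, PySem.List.index?_cons_of_ne _ (by simpa using hx)]
      rw [List.find?_cons_of_neg (by simpa using hx)]
      rw [← ih]
      cases h : PySem.List.index? (tl.map key) v with
      | none => simp
      | some i =>
        simp only [Option.map_some]
        rw [PySem.List.pyGetD_natCast, PySem.List.pyGetD_natCast]
        simp

-- the selection branch: A's sorted(items,key)[0] = B's items[dists.index(min(dists))]
theorem pvSelect_eq (key : (List (String × String)) → Int)
    (items : List (List (String × String))) (hne : items ≠ []) :
    PySem.List.pyGetD (PySem.List.sorted items key false) 0 [] =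
      (match PySem.List.index? (items.map key)
          ((PySem.List.min? (items.map key) (fun x => x)).getD 0) with
       | some i => PySem.List.pyGetD items (i : Int) []
       | none => []) := by
  obtain ⟨r, hr⟩ := Option.isSome_iff_exists.mp
    (by rw [Option.isSome_iff_ne_none]; simp [PySem.List.min?_eq_none_iff, hne] :
      (PySem.List.min? items key).isSome)
  rw [pvPyGetD_zero_head, pvHead?_sorted_eq_min?, hr]
  rw [pvIndexSel_eq_find? key items _ []]
  rw [pvMinVal_eq_key key items r hr]
  simp only [Option.getD_some]
  rw [pvMin?_find? key items r hr]
  simp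

-- ===== VERDICT (by name: the statement is the Claim_ definition above) =====
theorem choose_representative_py_spec : Claim_equal_choose_representative_py := by
  intro items preferred_pages _ _
  unfold Spec_choose_representative_py choose_representative_py choose_representative_py_alt
  by_cases h0 : items = []
  · simp [h0]
  · simp only [h0, ite_false]
    cases hscan : (if preferred_pages ≠ [] then items.find? (pvPrefHit preferred_pages) else none) with
    | some it => rfl
    | none =>
      by_cases hp : (items.filter pvIsDigitPage).map pvPageInt = []
      · simp [hp]
      · rw [if_pos hp, if_neg hp]
        rw [pvMedian_eq _ hp]
        exact pvSelect_eq _ items h0
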